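-- pv_equiv track=rewrite | github.com/sistemastecnologico/AI-Automation-Software | ia_engine.py | cerebro_ia_mercadolibre
-- ===== SOURCE A (Python) =====
-- def cerebro_ia_mercadolibre(comentario):
--     # Diccionario de entrenamiento (Patrones de datos)
--     palabras_positivas = ["excelente", "bueno", "increible", "comprar"]
--     palabras_negativas = ["malo", "estafa", "basura", "caro"]
--
--     puntuacion = 0
--     palabras = comentario.lower().split()
--
--     for p in palabras:
--         if p in palabras_positivas: puntuacion += 1
--         if p in palabras_negativas: puntuacion -= 1
--
--     # Resultado de la IA
--     if puntuacion > 0: return "IA: El cliente está feliz. (Recomendación: Escalar negocio)"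
--     elif puntuacion < 0: return "IA: El cliente está enojado. (Recomendación: Revisar soporte)"
--     else: return "IA: Comentario neutral."
-- ===== SOURCE B (Python) =====
-- def cerebro_ia_mercadolibre(comentario):
--     # Frequency table first, then score by querying it per keyword.
--     palabras_positivas = ["excelente", "bueno", "increible", "comprar"]
--     palabras_negativas = ["malo", "estafa", "basura", "caro"]
--
--     frecuencia = {}
--     for p in comentario.lower().split():
--         frecuencia[p] = frecuencia.get(p, 0) + 1
--
--     puntuacion = sum(frecuencia.get(w, 0) for w in palabras_positivas) \
--                - sum(frecuencia.get(w, 0) for w in palabras_negativas)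
--
--     if puntuacion > 0: return "IA: El cliente está feliz. (Recomendación: Escalar negocio)"
--     elif puntuacion < 0: return "IA: El cliente está enojado. (Recomendación: Revisar soporte)"
--     else: return "IA: Comentario neutral."
-- ===== Notes on version B (the rewrite author's own statement) =====
-- stated objective: idiomatic
-- what changed: B builds a word-frequency dict in one pass and then scores by iterating over the two fixed keyword lists summing lookups, instead of scanning the words and membership-testing each against both keyword lists.
import Mathlib
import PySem

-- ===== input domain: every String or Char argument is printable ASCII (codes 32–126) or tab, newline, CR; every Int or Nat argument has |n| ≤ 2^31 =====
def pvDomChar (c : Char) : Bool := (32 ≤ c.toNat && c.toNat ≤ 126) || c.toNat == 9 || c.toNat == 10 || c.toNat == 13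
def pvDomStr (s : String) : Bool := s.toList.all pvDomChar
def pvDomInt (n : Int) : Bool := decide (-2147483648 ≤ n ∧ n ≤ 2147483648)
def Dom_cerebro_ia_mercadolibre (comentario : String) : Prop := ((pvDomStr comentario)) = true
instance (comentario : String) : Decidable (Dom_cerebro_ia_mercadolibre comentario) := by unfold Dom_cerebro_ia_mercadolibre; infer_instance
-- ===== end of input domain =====

-- B builds a word-frequency dict once and scores by summing lookups over the fixed keyword lists (idiomatic restructuring; same results).


-- ===== PORT A =====
def cerebro_ia_mercadolibre (comentario : String) : String :=
  let palabras_positivas : List String := ["excelente", "bueno", "increible", "comprar"]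
  let palabras_negativas : List String := ["malo", "estafa", "basura", "caro"]
  let palabras := PySem.Str.split₀ (PySem.Str.lower comentario)
  let puntuacion : Int := palabras.foldl (fun acc p =>
    let acc := if p ∈ palabras_positivas then acc + 1 else acc
    if p ∈ palabras_negativas then acc - 1 else acc) 0
  if puntuacion > 0 then "IA: El cliente está feliz. (Recomendación: Escalar negocio)"
  else if puntuacion < 0 then "IA: El cliente está enojado. (Recomendación: Revisar soporte)"
  else "IA: Comentario neutral."

-- ===== PORT B =====
def cerebro_ia_mercadolibre_alt (comentario : String) : String :=
  let palabras_positivas : List String := ["excelente", "bueno", "increible", "comprar"]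
  let palabras_negativas : List String := ["malo", "estafa", "basura", "caro"]
  let frecuencia : PySem.Dict String Int :=
    (PySem.Str.split₀ (PySem.Str.lower comentario)).foldl
      (fun d p => d.insert p (d.getD p 0 + 1)) PySem.Dict.empty
  let puntuacion : Int :=
    (palabras_positivas.map (fun w => frecuencia.getD w 0)).sum
      - (palabras_negativas.map (fun w => frecuencia.getD w 0)).sum
  if puntuacion > 0 then "IA: El cliente está feliz. (Recomendación: Escalar negocio)"
  else if puntuacion < 0 then "IA: El cliente está enojado. (Recomendación: Revisar soporte)"
  else "IA: Comentario neutral."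

-- ===== PRECONDITION & SPEC =====
def Spec_cerebro_ia_mercadolibre (comentario : String) (out : String) : Prop := out = cerebro_ia_mercadolibre_alt comentario
instance (comentario : String) (out : String) : Decidable (Spec_cerebro_ia_mercadolibre comentario out) := by unfold Spec_cerebro_ia_mercadolibre; infer_instance

-- ===== CLAIM (what is proved, stated in full; the proofs are below) =====
def Claim_equal_cerebro_ia_mercadolibre : Prop := ∀ (comentario : String), Dom_cerebro_ia_mercadolibre comentario → Spec_cerebro_ia_mercadolibre comentario (cerebro_ia_mercadolibre comentario)

-- ===== LEMMAS AND PROOFS =====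

-- A's single scan computes the signed sum of keyword occurrence counts.
theorem scoreA_eq_counts (ws : List String) (a : Int) :
    ws.foldl (fun acc p =>
      let acc := if p ∈ (["excelente", "bueno", "increible", "comprar"] : List String) then acc + 1 else acc
      if p ∈ (["malo", "estafa", "basura", "caro"] : List String) then acc - 1 else acc) a
    = a + ((ws.count "excelente" : Int) + (ws.count "bueno") + (ws.count "increible") + (ws.count "comprar"))
        - ((ws.count "malo" : Int) + (ws.count "estafa") + (ws.count "basura") + (ws.count "caro")) := by
  induction ws generalizing a with
  | nil => simp
  | cons w ws ih =>
    rcases eq_or_ne w "excelente" with h|h1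
    · subst h; simp only [List.foldl_cons, ih, List.count_cons]
      simp; ring
    rcases eq_or_ne w "bueno" with h|h2
    · subst h; simp only [List.foldl_cons, ih, List.count_cons]
      simp; ring
    rcases eq_or_ne w "increible" with h|h3
    · subst h; simp only [List.foldl_cons, ih, List.count_cons]
      simp; ring
    rcases eq_or_ne w "comprar" with h|h4
    · subst h; simp only [List.foldl_cons, ih, List.count_cons]
      simp; ring
    rcases eq_or_ne w "malo" with h|h5
    · subst h; simp only [List.foldl_cons, ih, List.count_cons]
      simp; ring
    rcases eq_or_ne w "estafa" with h|h6
    · subst h; simp only [List.foldl_cons, ih, List.count_cons]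
      simp; ring
    rcases eq_or_ne w "basura" with h|h7
    · subst h; simp only [List.foldl_cons, ih, List.count_cons]
      simp; ring
    rcases eq_or_ne w "caro" with h|h8
    · subst h; simp only [List.foldl_cons, ih, List.count_cons]
      simp; ring
    simp only [List.foldl_cons, ih, List.count_cons]
    simp [h1, h2, h3, h4, h5, h6, h7, h8]

theorem punt_eq (ws : List String) :
    ws.foldl (fun acc p =>
      let acc := if p ∈ (["excelente", "bueno", "increible", "comprar"] : List String) then acc + 1 else acc
      if p ∈ (["malo", "estafa", "basura", "caro"] : List String) then acc - 1 else acc) (0:Int)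
    = ((["excelente", "bueno", "increible", "comprar"] : List String).map
        (fun w => (ws.foldl (fun d p => d.insert p (d.getD p 0 + 1)) (PySem.Dict.empty : PySem.Dict String Int)).getD w 0)).sum
      - ((["malo", "estafa", "basura", "caro"] : List String).map
        (fun w => (ws.foldl (fun d p => d.insert p (d.getD p 0 + 1)) (PySem.Dict.empty : PySem.Dict String Int)).getD w 0)).sum := by
  simp only [scoreA_eq_counts, PySem.Dict.getD_foldl_insert_add_one, List.map_cons, List.map_nil,
    List.sum_cons, List.sum_nil, add_zero]
  simp [PySem.Dict.getD, PySem.Dict.empty, PySem.Dict.get?]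
  ring

theorem cerebro_equal (comentario : String) :
    cerebro_ia_mercadolibre comentario = cerebro_ia_mercadolibre_alt comentario := by
  unfold cerebro_ia_mercadolibre cerebro_ia_mercadolibre_alt
  simp only [punt_eq]

-- ===== VERDICT (by name: the statement is the Claim_ definition above) =====
theorem cerebro_ia_mercadolibre_spec : Claim_equal_cerebro_ia_mercadolibre := by
  intro c _; exact cerebro_equal c
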